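-- pv_equiv track=rewrite | github.com/Sozim1/Desafio-F360 | Exercicio 5.py | inverte_com_espaco
-- ===== SOURCE A (Python) =====
-- def inverte_com_espaco(s):
--     vogais = "aeiouAEIOU"
--     nova_string = ""
--     for i in range(len(s)-1, -1, -1):
--         if s[i] in vogais:
--             nova_string += s[i] + " "
--         else:
--             nova_string += s[i]
--     return nova_string
-- ===== SOURCE B (Python) =====
-- def inverte_com_espaco(s):
--     vogais = "aeiouAEIOU"
--     partes = []
--     for c in s:
--         if c in vogais:
--             partes.append(" ")
--             partes.append(c)
--         else:
--             partes.append(c)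
--     return "".join(partes)[::-1]
-- ===== Notes on version B (the rewrite author's own statement) =====
-- stated objective: faster
-- what changed: Replaces A's backward index-loop with repeated string concatenation by a forward pass that emits a space before each vowel into a list joined once, followed by one full slice reversal.
import Mathlib
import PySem

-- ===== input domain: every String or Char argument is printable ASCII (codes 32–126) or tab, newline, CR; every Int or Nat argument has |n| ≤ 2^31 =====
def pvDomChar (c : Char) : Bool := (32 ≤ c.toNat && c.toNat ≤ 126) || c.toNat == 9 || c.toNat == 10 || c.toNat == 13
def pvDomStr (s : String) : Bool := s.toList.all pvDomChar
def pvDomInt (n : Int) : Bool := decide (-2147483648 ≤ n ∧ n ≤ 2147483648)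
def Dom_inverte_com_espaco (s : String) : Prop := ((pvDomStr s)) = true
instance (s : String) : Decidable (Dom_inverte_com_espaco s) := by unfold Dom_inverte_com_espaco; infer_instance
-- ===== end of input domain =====

-- B replaces A's backward index-loop (string += per char) by a forward pass emitting
-- ' '+c before each vowel into a list joined once, then one full reversal.

-- ===== PORT A =====
-- A: for i in range(len(s)-1, -1, -1): append s[i]+" " if vowel else s[i]
def inverte_com_espaco (s : String) : String :=
  let cs := s.toList
  let vogais := "aeiouAEIOU".toList
  String.ofList <|
    (PySem.List.pyRange ((cs.length : Int) - 1) (-1) (-1)).foldl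
      (fun acc i =>
        let c := PySem.List.pyGetD cs i ' '   -- i is always in range in this loop
        if c ∈ vogais then acc ++ [c, ' '] else acc ++ [c]) []

-- ===== PORT B =====
-- B: forward pass appending " "+c for vowels (as list pieces), join, then reverse
def inverte_com_espaco_alt (s : String) : String :=
  let vogais := "aeiouAEIOU".toList
  let partes := s.toList.flatMap (fun c => if c ∈ vogais then [' ', c] else [c])
  String.ofList partes.reverse

-- ===== PRECONDITION & SPEC =====
def Spec_inverte_com_espaco (s : String) (out : String) : Prop := out = inverte_com_espaco_alt s
instance (s : String) (out : String) : Decidable (Spec_inverte_com_espaco s out) := by unfold Spec_inverte_com_espaco; infer_instance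

-- ===== CLAIM (what is proved, stated in full; the proofs are below) =====
def Claim_equal_inverte_com_espaco : Prop := ∀ (s : String), Dom_inverte_com_espaco s → Spec_inverte_com_espaco s (inverte_com_espaco s)

-- ===== LEMMAS AND PROOFS =====

-- A's backward loop over indices of cs produces the reverse of B's forward flatMap.
theorem pv_loop_eq (vog : List Char) :
    ∀ (cs : List Char) (acc : List Char),
      (PySem.List.pyRange ((cs.length : Int) - 1) (-1) (-1)).foldl
        (fun acc i =>
          let c := PySem.List.pyGetD cs i ' '
          if c ∈ vog then acc ++ [c, ' '] else acc ++ [c]) acc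
      = acc ++ (cs.flatMap (fun c => if c ∈ vog then [' ', c] else [c])).reverse := by
  intro cs
  induction cs using List.reverseRecOn with
  | nil => intro acc; simp [PySem.List.pyRange_neg_one_eq_nil]
  | append_singleton ys c ih =>
    intro acc
    have hlen : ((ys ++ [c]).length : Int) - 1 = (ys.length : Int) := by
      simp
    rw [hlen, PySem.List.pyRange_neg_one_cons (by omega), List.foldl_cons]
    have hget : PySem.List.pyGetD (ys ++ [c]) ((ys.length : Nat) : Int) ' ' = c := by
      rw [PySem.List.pyGetD_natCast]
      simp
    simp only [hget]
    rw [PySem.List.foldl_congr_mem _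
      (fun acc i =>
        let x := PySem.List.pyGetD (ys ++ [c]) i ' '
        if x ∈ vog then acc ++ [x, ' '] else acc ++ [x])
      (fun acc i =>
        let x := PySem.List.pyGetD ys i ' '
        if x ∈ vog then acc ++ [x, ' '] else acc ++ [x])
      _
      (by
        intro a i hi
        have hmem := (PySem.List.mem_pyRange_neg_one).mp hi
        have h0 : 0 ≤ i := by omega
        have h1 : i < (ys.length : Int) := by omega
        have hg : PySem.List.pyGetD (ys ++ [c]) i ' ' = PySem.List.pyGetD ys i ' ' := by
          rw [PySem.List.pyGetD_eq_getElem _ _ h0 (by simp; omega),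
              PySem.List.pyGetD_eq_getElem _ _ h0 (by exact_mod_cast h1)]
          exact List.getElem_append_left (by omega)
        simp only [hg])]
    rw [ih]
    by_cases hv : c ∈ vog
    · simp [hv, List.flatMap_append]
    · simp [hv, List.flatMap_append]

-- ===== VERDICT (by name: the statement is the Claim_ definition above) =====
theorem inverte_com_espaco_spec : Claim_equal_inverte_com_espaco := by
  intro s _
  unfold Spec_inverte_com_espaco inverte_com_espaco inverte_com_espaco_alt
  simp only [pv_loop_eq]
  simp
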